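-- pv_equiv track=rewrite | github.com/neumond/python-computer-craft | computercraft/rproc.py | lua_table_to_list
-- ===== SOURCE A (Python) =====
-- def lua_table_to_list(x, length: int = None):
--     if not x:
--         return [] if length is None else [None] * length
--     assert all(map(lambda k: isinstance(k, int), x.keys()))
--     assert min(x.keys()) >= 1
--     if length is not None:
--         assert max(x.keys()) <= length
--     else:
--         length = max(x.keys())
--     return [x.get(i + 1) for i in range(length)]
-- ===== SOURCE B (Python) =====
-- def lua_table_to_list(x, length: int = None):
--     if not x:
--         return [] if length is None else [None] * length
--     items = sorted(x.items(), key=lambda kv: kv[0])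
--     assert all(isinstance(k, int) for k, _ in items)
--     assert items[0][0] >= 1
--     if length is not None:
--         assert items[-1][0] <= length
--     else:
--         length = items[-1][0]
--     out = []
--     for k, v in items:
--         out.extend([None] * (k - 1 - len(out)))
--         out.append(v)
--     out.extend([None] * (length - len(out)))
--     return out
-- ===== Notes on version B (the rewrite author's own statement) =====
-- stated objective: alternative
-- what changed: Instead of gathering with one dict lookup per output index over range(length), B sorts the items by key once and builds the list left-to-right in a single pass, padding each gap with None and padding the tail to length; min/max guards become first/last of the sorted items.
import Mathlib
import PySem

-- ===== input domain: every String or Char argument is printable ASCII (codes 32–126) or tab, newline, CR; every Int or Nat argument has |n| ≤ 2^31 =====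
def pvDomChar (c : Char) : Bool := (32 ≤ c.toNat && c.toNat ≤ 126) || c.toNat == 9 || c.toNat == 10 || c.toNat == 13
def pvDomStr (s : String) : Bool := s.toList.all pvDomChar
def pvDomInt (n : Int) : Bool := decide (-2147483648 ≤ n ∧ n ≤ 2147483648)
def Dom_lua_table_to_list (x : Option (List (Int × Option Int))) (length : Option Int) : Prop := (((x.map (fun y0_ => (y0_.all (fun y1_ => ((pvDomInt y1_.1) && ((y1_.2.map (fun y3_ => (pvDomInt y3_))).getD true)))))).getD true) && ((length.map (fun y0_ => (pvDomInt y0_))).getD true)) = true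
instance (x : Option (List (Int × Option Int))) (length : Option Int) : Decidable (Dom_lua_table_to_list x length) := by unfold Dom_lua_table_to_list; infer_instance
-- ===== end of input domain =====

-- B replaces A's gather (one dict lookup per index of range(length)) with sort-then-scan:
-- sort the items by key once, build the list left-to-right padding gaps with None, pad the
-- tail to length; min/max guards become first/last of the sorted items (alternative decomposition).

-- ===== PORT A =====
def lua_table_to_list (x : Option (List (Int × Option Int))) (length : Option Int) : List (Option Int) :=
  match x with
  | none =>
    -- not x: falsy table
    match length with | none => [] | some L => List.replicate L.toNat none
  | some l =>
    if l.isEmpty then match length with | none => [] | some L => List.replicate L.toNat none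
    else
      let d : PySem.Dict Int (Option Int) := PySem.Dict.ofList l
      -- asserts: min(x.keys()) >= 1, max(x.keys()) <= length — Pre_ excludes failures
      let len : Int :=
        match length with
        | some L => L
        | none => ((PySem.List.max? d.keys (fun k => k)).getD 0)   -- length = max(x.keys())
      -- [x.get(i + 1) for i in range(length)]
      (PySem.List.pyRange 0 len 1).map (fun i => (d.get? (i + 1)).getD none)

-- ===== PORT B =====
def lua_table_to_list_alt (x : Option (List (Int × Option Int))) (length : Option Int) : List (Option Int) :=
  match x with
  | none => match length with | none => [] | some L => List.replicate L.toNat none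
  | some l =>
    if l.isEmpty then match length with | none => [] | some L => List.replicate L.toNat none
    else
      -- items = sorted(x.items(), key=lambda kv: kv[0])
      let items : List (Int × Option Int) :=
        PySem.List.sorted (PySem.Dict.ofList l).items (fun kv => kv.1)
      -- asserts: items[0][0] >= 1, items[-1][0] <= length — Pre_ excludes failures
      let len : Int :=
        match length with
        | some L => L
        | none => ((PySem.List.pyGet? items (-1)).getD (0, none)).1   -- length = items[-1][0]; items nonempty here
      -- for k, v in items: out.extend([None] * (k - 1 - len(out))); out.append(v)
      let out : List (Option Int) :=
        items.foldl (fun out kv =>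
          (out ++ List.replicate (kv.1 - 1 - (out.length : Int)).toNat none) ++ [kv.2]) []
      -- out.extend([None] * (length - len(out)))
      out ++ List.replicate (len - (out.length : Int)).toNat none

-- ===== PRECONDITION & SPEC =====
-- Pre_ excludes exactly the inputs where A's asserts fail (AssertionError): a nonempty table
-- with a key < 1, or a key exceeding a given length.
def Pre_lua_table_to_list (x : Option (List (Int × Option Int))) (length : Option Int) : Prop :=
  ∀ p ∈ x.getD [], 1 ≤ p.1 ∧ p.1 ≤ length.getD p.1
instance (x : Option (List (Int × Option Int))) (length : Option Int) : Decidable (Pre_lua_table_to_list x length) := by unfold Pre_lua_table_to_list; infer_instance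

def pvWitness_lua_table_to_list : (Option (List (Int × Option Int))) × Option Int :=
  (some [(1, some 5), (3, none)], some 4)

def Spec_lua_table_to_list (x : Option (List (Int × Option Int))) (length : Option Int) (out : List (Option Int)) : Prop := out = lua_table_to_list_alt x length
instance (x : Option (List (Int × Option Int))) (length : Option Int) (out : List (Option Int)) : Decidable (Spec_lua_table_to_list x length out) := by unfold Spec_lua_table_to_list; infer_instance

-- ===== CLAIM (what is proved, stated in full; the proofs are below) =====
def Claim_equal_lua_table_to_list : Prop := ∀ (x : Option (List (Int × Option Int))) (length : Option Int), Dom_lua_table_to_list x length → Pre_lua_table_to_list x length → Spec_lua_table_to_list x length (lua_table_to_list x length)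

-- ===== LEMMAS AND PROOFS =====

-- value at key j as A's gather computes it: first match on an item list
def pvGather (items : List (Int × Option Int)) (j : Int) : Option Int :=
  ((items.find? (fun p => p.1 == j)).map Prod.snd).getD none

-- B's fill step
def pvStep (out : List (Option Int)) (kv : Int × Option Int) : List (Option Int) :=
  (out ++ List.replicate (kv.1 - 1 - (out.length : Int)).toNat none) ++ [kv.2]

-- with nodup keys, find? is determined by the (unique) entry with that key
theorem pvFind_of_mem (l : List (Int × Option Int)) (a : Int × Option Int) (j : Int)
    (hnd : (l.map Prod.fst).Nodup) (ha : a ∈ l) (haj : a.1 = j) :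
    l.find? (fun p => p.1 == j) = some a := by
  induction l with
  | nil => simp at ha
  | cons b t ih =>
    rcases List.mem_cons.mp ha with rfl | hat
    · simp [haj]
    · obtain ⟨hb1, hnd2⟩ : (∀ y : Option Int, (b.1, y) ∉ t) ∧ (List.map Prod.fst t).Nodup := by
        simpa using hnd
      have hbj : ¬ (b.1 == j) = true := by
        simp only [beq_iff_eq]
        intro h
        exact hb1 a.2 (by rw [h, ← haj]; exact hat)
      rw [List.find?_cons_of_neg (p := fun p => p.1 == j) (l := t) hbj]
      exact ih hnd2 hat

-- pvGather is invariant under permutation when keys are nodup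
theorem pvGather_perm (l₁ l₂ : List (Int × Option Int)) (j : Int)
    (hp : l₁.Perm l₂) (hnd : (l₂.map Prod.fst).Nodup) :
    pvGather l₁ j = pvGather l₂ j := by
  have hnd₁ : (l₁.map Prod.fst).Nodup := (hnd.perm (hp.map Prod.fst).symm)
  by_cases h : ∃ a ∈ l₂, a.1 = j
  · obtain ⟨a, ha, haj⟩ := h
    rw [pvGather, pvGather, pvFind_of_mem l₂ a j hnd ha haj,
      pvFind_of_mem l₁ a j hnd₁ (hp.mem_iff.mpr ha) haj]
  · push_neg at h
    rw [pvGather, pvGather, List.find?_eq_none.mpr, List.find?_eq_none.mpr]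
    · intro a ha; simpa using h a ha
    · intro a ha; simpa using h a (hp.mem_iff.mp ha)

theorem pvMap_range_none (n : Nat) (f : Nat → Option Int) (h : ∀ i < n, f i = none) :
    (List.range n).map f = List.replicate n none := by
  apply List.ext_getElem
  · simp
  · intro i h1 h2
    simp only [List.getElem_map, List.getElem_range, List.getElem_replicate]
    exact h i (by simpa using h1)

-- the core invariant of B's scan: filling from a strictly key-increasing item list whose keys
-- lie strictly above |out| and at most M, then padding to M, gathers exactly keys |out|+1 .. M
theorem pvFill (items : List (Int × Option Int)) (out : List (Option Int)) (M : Int)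
    (hs : items.Pairwise (fun a b => a.1 < b.1))
    (hlow : ∀ p ∈ items, (out.length : Int) < p.1)
    (hhigh : ∀ p ∈ items, p.1 ≤ M)
    (hM : (out.length : Int) ≤ M) :
    (items.foldl pvStep out) ++
      List.replicate (M - ((items.foldl pvStep out).length : Int)).toNat none
    = out ++ (List.range (M - (out.length : Int)).toNat).map
        (fun i : Nat => pvGather items ((out.length : Int) + (i : Int) + 1)) := by
  induction items generalizing out with
  | nil =>
    simp only [List.foldl_nil]
    congr 1
    rw [pvMap_range_none _ _ (fun i _ => by simp [pvGather])]
  | cons kv rest ih =>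
    obtain ⟨k, v⟩ := kv
    have hk : (out.length : Int) < k := hlow (k, v) List.mem_cons_self
    have hkM : k ≤ M := hhigh (k, v) List.mem_cons_self
    have hrest_gt : ∀ p ∈ rest, k < p.1 := by
      intro p hp; exact (List.pairwise_cons.mp hs).1 p hp
    set c : Int := (out.length : Int) with hc
    set n1 : Nat := (k - 1 - c).toNat with hn1
    have hn1' : (n1 : Int) = k - 1 - c := by omega
    set out' : List (Option Int) := (out ++ List.replicate n1 none) ++ [v] with hout'
    have hlen' : (out'.length : Int) = k := by
      simp [hout']; omega
    have hstep : pvStep out (k, v) = out' := by rfl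
    have IH := ih out'
      (by simpa using (List.pairwise_cons.mp hs).2)
      (by intro p hp; rw [hlen']; exact hrest_gt p hp)
      (by intro p hp; exact hhigh p (List.mem_cons_of_mem _ hp))
      (by rw [hlen']; omega)
    rw [List.foldl_cons, hstep, IH, hlen']
    -- split the target range c+1..M into c+1..k-1, k, k+1..M
    have hsplit : (M - c).toNat = (n1 + 1) + (M - k).toNat := by omega
    rw [hsplit, List.range_add, List.range_succ, List.map_append, List.map_append,
      List.map_map]
    -- chunk 1: keys c+1..k-1 are below every key of (k,v)::rest → none
    have hchunk1 : (List.range n1).map (fun i : Nat => pvGather ((k, v) :: rest) (c + (i : Int) + 1))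
        = List.replicate n1 none := by
      apply pvMap_range_none
      intro i hi
      rw [pvGather, List.find?_eq_none.mpr]
      · rfl
      · intro p hp
        rcases List.mem_cons.mp hp with rfl | hpt
        · simp only [beq_iff_eq]; omega
        · have := hrest_gt p hpt; simp only [beq_iff_eq]; omega
    -- chunk 2: key k hits the head
    have hchunk2 : pvGather ((k, v) :: rest) (c + (n1 : Int) + 1) = v := by
      have harg : c + (n1 : Int) + 1 = k := by omega
      rw [harg]
      simp [pvGather]
    -- chunk 3: keys above k skip the head
    have hchunk3 : ∀ i : Nat, pvGather ((k, v) :: rest) (c + ((n1 + 1 + i : Nat) : Int) + 1)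
        = pvGather rest (k + (i : Int) + 1) := by
      intro i
      have harg : c + ((n1 + 1 + i : Nat) : Int) + 1 = k + (i : Int) + 1 := by
        push_cast; omega
      rw [harg]
      simp only [pvGather]
      rw [List.find?_cons_of_neg (by simp only [beq_iff_eq]; omega)]
    simp only [List.map_cons, List.map_nil, hchunk1, hchunk2, Function.comp_def]
    rw [List.map_congr_left (fun i _ => hchunk3 i)]
    simp [hout', List.append_assoc]
-- the keys of Dict.ofList l are the dedup of l's keys
theorem pvKeys_ofList (l : List (Int × Option Int)) :
    (PySem.Dict.ofList l).keys = PySem.Set.ofList (l.map Prod.fst) := by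
  show (List.foldl (fun d (p : Int × Option Int) => d.insert p.1 p.2) PySem.Dict.empty l).keys = _
  rw [PySem.Dict.keys_foldl_insert_key l Prod.fst (fun d p => p.2)]
  exact PySem.Set.update_nil_left _

theorem pvItems_key_mem (l : List (Int × Option Int)) {p : Int × Option Int}
    (hp : p ∈ (PySem.Dict.ofList l).items) : p.1 ∈ l.map Prod.fst := by
  have := PySem.Dict.mem_keys_of_mem_items _ hp
  rw [pvKeys_ofList] at this
  exact (PySem.Set.mem_ofList _ _).mp this

theorem pvItems_ne_nil (l : List (Int × Option Int)) (hne : l ≠ []) :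
    (PySem.Dict.ofList l).items ≠ [] := by
  obtain ⟨p, hp⟩ := List.exists_mem_of_ne_nil l hne
  intro h
  have hm : p.1 ∈ (PySem.Dict.ofList l).keys := by
    rw [pvKeys_ofList, PySem.Set.mem_ofList]
    exact List.mem_map_of_mem hp
  simp [PySem.Dict.keys, h] at hm

-- the shared core: A's gather over range(len) equals B's sorted scan padded to len
theorem pvBoth (l : List (Int × Option Int)) (len : Int) (hne : l ≠ [])
    (hkey1 : ∀ p ∈ l, 1 ≤ p.1)
    (hkeyle : ∀ p ∈ (PySem.Dict.ofList l).items, p.1 ≤ len) :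
    (PySem.List.pyRange 0 len 1).map (fun i => ((PySem.Dict.ofList l).get? (i + 1)).getD none)
    = (let items := PySem.List.sorted (PySem.Dict.ofList l).items (fun kv => kv.1)
       let out := items.foldl (fun out kv =>
         (out ++ List.replicate (kv.1 - 1 - (out.length : Int)).toNat none) ++ [kv.2]) []
       out ++ List.replicate (len - (out.length : Int)).toNat none) := by
  set d : PySem.Dict Int (Option Int) := PySem.Dict.ofList l with hd
  set items : List (Int × Option Int) := PySem.List.sorted d.items (fun kv => kv.1) with hitems
  have hperm : items.Perm d.items := PySem.List.sorted_perm _ _ _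
  have hndk : (d.items.map Prod.fst).Nodup := by
    have := PySem.Dict.nodup_keys_ofList (κ := Int) (ν := Option Int) l
    simpa [hd, PySem.Dict.keys] using this
  have hnditems : (items.map Prod.fst).Nodup := hndk.perm (hperm.map Prod.fst).symm
  have hle : items.Pairwise (fun a b => a.1 ≤ b.1) := PySem.List.sorted_pairwise _ _
  have hneq : items.Pairwise (fun a b => a.1 ≠ b.1) := List.pairwise_map.mp hnditems
  have hs : items.Pairwise (fun a b => a.1 < b.1) := by
    have := hle.and hneq
    exact this.imp (fun h => lt_of_le_of_ne h.1 h.2)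
  have hmem_l : ∀ p ∈ items, ∃ q ∈ l, q.1 = p.1 := by
    intro p hp
    obtain ⟨q, hq, hq1⟩ := List.mem_map.mp (pvItems_key_mem l (hperm.mem_iff.mp hp))
    exact ⟨q, hq, hq1⟩
  have hlow : ∀ p ∈ items, ((([] : List (Option Int)).length : Int)) < p.1 := by
    intro p hp
    obtain ⟨q, hq, hq1⟩ := hmem_l p hp
    have := hkey1 q hq
    simp; omega
  have hhigh : ∀ p ∈ items, p.1 ≤ len := fun p hp => hkeyle p (hperm.mem_iff.mp hp)
  have hitems_ne : items ≠ [] := by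
    rw [hitems, Ne, PySem.List.sorted_eq_nil_iff]
    exact pvItems_ne_nil l hne
  have hM : ((([] : List (Option Int)).length : Int)) ≤ len := by
    obtain ⟨p, hp⟩ := List.exists_mem_of_ne_nil items hitems_ne
    have h1 := hlow p hp
    have h2 := hhigh p hp
    simp at h1 ⊢; omega
  have hfill := pvFill items [] len hs hlow hhigh hM
  show _ = (items.foldl pvStep []) ++
      List.replicate (len - (((items.foldl pvStep []).length : Int))).toNat none
  rw [hfill]
  apply List.ext_getElem
  · simp [PySem.List.length_pyRange_one]
  · intro i h1 h2
    simp only [List.getElem_map, List.getElem_range, List.nil_append,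
      PySem.List.getElem_pyRange_one]
    have hzero : (0 : Int) + (i : Int) + 1 = (i : Int) + 1 := by ring
    rw [show ((([] : List (Option Int)).length : Int)) = (0 : Int) by simp, hzero,
      pvGather_perm items d.items ((i : Int) + 1) hperm hndk]
    rfl

-- the nonempty-table case of the two ports
theorem pvMain (l : List (Int × Option Int)) (length : Option Int)
    (hne : l ≠ []) (hpre : ∀ p ∈ l, 1 ≤ p.1 ∧ p.1 ≤ length.getD p.1) :
    lua_table_to_list (some l) length = lua_table_to_list_alt (some l) length := by
  have hisE : l.isEmpty = false := by simpa using hne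
  have hkey1 : ∀ p ∈ l, 1 ≤ p.1 := fun p hp => (hpre p hp).1
  simp only [lua_table_to_list, lua_table_to_list_alt, hisE, Bool.false_eq_true, if_false]
  cases length with
  | some L =>
    apply pvBoth l L hne hkey1
    intro p hp
    obtain ⟨q, hq, hq1⟩ := List.mem_map.mp (pvItems_key_mem l hp)
    have := (hpre q hq).2
    simp at this; omega
  | none =>
    -- both fallback lengths are the maximal key: A's max?, B's last of the sorted items
    set d : PySem.Dict Int (Option Int) := PySem.Dict.ofList l with hd
    set items : List (Int × Option Int) := PySem.List.sorted d.items (fun kv => kv.1) with hitems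
    have hperm : items.Perm d.items := PySem.List.sorted_perm _ _ _
    have hitems_ne : items ≠ [] := by
      rw [hitems, Ne, PySem.List.sorted_eq_nil_iff]
      exact pvItems_ne_nil l hne
    set last : Int × Option Int := items.getLast hitems_ne with hlast
    have hlast_mem : last ∈ items := List.getLast_mem hitems_ne
    have hlast_ge : ∀ p ∈ items, p.1 ≤ last.1 := by
      intro p hp
      obtain ⟨i, hi, hpi⟩ := List.mem_iff_getElem.mp hp
      have hlg : last.1 = items[items.length - 1].1 := by
        rw [hlast, List.getLast_eq_getElem]
      have hlen_pos : 0 < items.length := List.length_pos_of_ne_nil hitems_ne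
      have hstep : items[i].1 ≤ items[items.length - 1].1 := by
        by_cases hi' : i = items.length - 1
        · subst hi'; exact le_refl _
        · exact (List.pairwise_iff_getElem.mp (PySem.List.sorted_pairwise
            (d.items) (fun kv => kv.1))) i (items.length - 1)
            (by rw [← hitems]; omega) (by rw [← hitems]; omega) (by omega)
      rw [← hpi, hlg]
      exact hstep
    have hkeys_ne : d.keys ≠ [] := by
      intro h
      apply pvItems_ne_nil l hne
      have hmap : d.items.map Prod.fst = [] := by simpa [PySem.Dict.keys] using h
      exact List.map_eq_nil_iff.mp hmap
    obtain ⟨m, hm⟩ : ∃ m, PySem.List.max? d.keys (fun k => k) = some m := by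
      cases hmx : PySem.List.max? d.keys (fun k => k) with
      | none => exact absurd ((PySem.List.max?_eq_none_iff _ _).mp hmx) hkeys_ne
      | some m => exact ⟨m, rfl⟩
    have hm_eq : m = last.1 := by
      have hmmem : m ∈ d.keys := PySem.List.max?_mem hm
      obtain ⟨vm, hvm⟩ : ∃ y, (m, y) ∈ d.items := by
        simpa [PySem.Dict.keys] using hmmem
      have h1 : m ≤ last.1 := hlast_ge (m, vm) (hperm.mem_iff.mpr hvm)
      have h2 : last.1 ≤ m := by
        have hlk : last.1 ∈ d.keys := by
          simp only [PySem.Dict.keys]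
          exact List.mem_map_of_mem (hperm.mem_iff.mp hlast_mem)
        simpa using PySem.List.max?_isMax hm last.1 hlk
      omega
    have hlastB : PySem.List.pyGet? items (-1) = some last := by
      rw [PySem.List.pyGet?_neg_one, hlast, List.getLast?_eq_some_getLast (h := hitems_ne)]
    rw [hm, hlastB]
    simp only [Option.getD_some]
    rw [hm_eq]
    exact pvBoth l last.1 hne hkey1 (fun p hp => hlast_ge p (hperm.mem_iff.mpr hp))

-- ===== VERDICT (by name: the statement is the Claim_ definition above) =====
theorem lua_table_to_list_spec : Claim_equal_lua_table_to_list := by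
  intro x length _ hpre
  unfold Spec_lua_table_to_list
  cases x with
  | none => rfl
  | some l =>
    cases hl : l with
    | nil => rfl
    | cons p ps =>
      rw [← hl]
      exact pvMain l length (by simp [hl]) (by simpa [Pre_lua_table_to_list] using hpre)
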